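-- pv_equiv track=rewrite | github.com/wiv33/A-Learning-python | practice_algorithm/programmers/schools/01/maximum_bell.py | solution
-- ===== SOURCE A (Python) =====
-- def solution(bell):
--     start = {}
--     end = {}
--
--     convert_list = [-1 if x == 1 else 1 for x in bell]
--     acc = [0] * len(convert_list)
--     temp_val = 0
--     for x in range(len(convert_list)):
--         temp_val += convert_list[x]
--         acc[x] = temp_val
--
--     for i, x in enumerate(acc):
--         if x not in start:
--             start[x] = i
--         end[x] = i
--
--     return max(end[x] - start[x] for x in end)
-- ===== SOURCE B (Python) =====
-- def solution(bell):
--     prefix = []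
--     t = 0
--     for x in bell:
--         t += -1 if x == 1 else 1
--         prefix.append(t)
--     order = sorted(range(len(prefix)), key=lambda i: prefix[i])
--     spans = []
--     k = 0
--     while k < len(order):
--         v = prefix[order[k]]
--         lo = hi = order[k]
--         k += 1
--         while k < len(order) and prefix[order[k]] == v:
--             lo = min(lo, order[k])
--             hi = max(hi, order[k])
--             k += 1
--         spans.append(hi - lo)
--     return max(spans)
-- ===== Notes on version B (the rewrite author's own statement) =====
-- stated objective: alternative
-- what changed: B sorts the index range by prefix-sum value and scans the sorted order once, emitting max-min index per run of equal values, instead of A's hash-dict passes recording first/last index per value; no dicts at all.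
import Mathlib
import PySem

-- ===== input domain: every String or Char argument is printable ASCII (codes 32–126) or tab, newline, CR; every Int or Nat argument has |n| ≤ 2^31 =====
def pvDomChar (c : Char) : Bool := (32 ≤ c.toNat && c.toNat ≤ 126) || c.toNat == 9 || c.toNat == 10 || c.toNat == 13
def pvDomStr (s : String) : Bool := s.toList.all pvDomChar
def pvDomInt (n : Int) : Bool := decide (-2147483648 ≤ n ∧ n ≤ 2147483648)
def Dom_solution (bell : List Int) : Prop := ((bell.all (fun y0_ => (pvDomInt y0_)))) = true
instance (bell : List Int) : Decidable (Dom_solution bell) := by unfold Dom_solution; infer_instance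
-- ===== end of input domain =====

-- B replaces A's first/last dicts by a sort of the index range by prefix-sum value followed by a
-- single scan over the sorted order, emitting (max index - min index) per run of equal values.
-- Return value only; neither program mutates its argument.

-- ===== PORT A =====
def solution (bell : List Int) : Int :=
  let convert := bell.map (fun x => if x = 1 then (-1 : Int) else 1)
  -- acc = [0]*n; temp_val = 0; for x in range(n): temp_val += convert[x]; acc[x] = temp_val
  -- (the loop writes indices 0..n-1 in order, so filling the preallocated array is ported as appending; exact)
  let st := (PySem.List.pyRange 0 (PySem.List.len convert) 1).foldl
      (fun (s : Int × List Int) x =>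
        (s.1 + PySem.List.pyGetD convert x 0, s.2 ++ [s.1 + PySem.List.pyGetD convert x 0])) (0, [])
  let acc := st.2
  let se := (PySem.List.enumerate acc).foldl
      (fun (p : PySem.Dict Int Int × PySem.Dict Int Int) ix =>
        ((if p.1.contains ix.2 then p.1 else p.1.insert ix.2 ix.1), p.2.insert ix.2 ix.1))
      (PySem.Dict.empty, PySem.Dict.empty)
  -- max(generator over the keys of end); raises ValueError on empty bell (excluded by Pre_), 0 outside
  (PySem.List.max? ((se.2.keys).map (fun v => se.2.getD v 0 - se.1.getD v 0)) (fun y => y)).getD 0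

-- ===== PORT B =====
-- the inner while: extend the current run (min/max of its indices) while the value matches,
-- else emit the finished span and start a new run at the current index (the outer while step)
def pvBGo (a : List Int) (v : Int) (lo hi : Nat) : List Nat → List Int
  | [] => [(hi : Int) - (lo : Int)]
  | j :: rest =>
    if a.getD j 0 = v then pvBGo a v (min lo j) (max hi j) rest
    else ((hi : Int) - (lo : Int)) :: pvBGo a (a.getD j 0) j j rest

-- the outer while over the sorted index order
def pvBRuns (a : List Int) : List Nat → List Int
  | [] => []
  | j :: rest => pvBGo a (a.getD j 0) j j rest

def solution_alt (bell : List Int) : Int :=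
  -- prefix = []; t = 0; for x in bell: t += -1 if x == 1 else 1; prefix.append(t)
  let st := bell.foldl
      (fun (s : Int × List Int) x =>
        (s.1 + (if x = 1 then (-1 : Int) else 1), s.2 ++ [s.1 + (if x = 1 then (-1 : Int) else 1)]))
      (0, [])
  let pfx := st.2
  -- order = sorted(range(len(prefix)), key=lambda i: prefix[i])
  let order := PySem.List.sorted (List.range pfx.length) (fun i => pfx.getD i 0) false
  let spans := pvBRuns pfx order
  -- max(spans) raises ValueError on empty bell (excluded by Pre_), 0 outside
  (PySem.List.max? spans (fun y => y)).getD 0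

-- ===== PRECONDITION & SPEC =====
-- Pre_ excludes only the empty list, on which both A's and B's max(...) raise ValueError.
def Pre_solution (bell : List Int) : Prop := bell ≠ []
instance (bell : List Int) : Decidable (Pre_solution bell) := by unfold Pre_solution; infer_instance
def pvWitness_solution : List Int := ([1, 0, 1, 1] : List Int)

def Spec_solution (bell : List Int) (out : Int) : Prop := out = solution_alt bell
instance (bell : List Int) (out : Int) : Decidable (Spec_solution bell out) := by unfold Spec_solution; infer_instance

-- ===== CLAIM (what is proved, stated in full; the proofs are below) =====
def Claim_equal_solution : Prop := ∀ (bell : List Int), Dom_solution bell → Pre_solution bell → Spec_solution bell (solution bell)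

-- ===== LEMMAS AND PROOFS =====

-- the converted step value
def pvConv (x : Int) : Int := if x = 1 then -1 else 1

-- the prefix-sum list both programs traverse
def pvAcc (t : Int) : List Int → List Int
  | [] => []
  | x :: r => (t + pvConv x) :: pvAcc (t + pvConv x) r

-- first index of v (meaningful when v ∈ a)
def pvF : List Int → Int → Nat
  | [], _ => 0
  | x :: r, v => if x = v then 0 else pvF r v + 1

-- last index of v (meaningful when v ∈ a)
def pvL : List Int → Int → Nat
  | [], _ => 0
  | _ :: r, v => if v ∈ r then pvL r v + 1 else 0

theorem pvL_lt (a : List Int) (v : Int) (h : v ∈ a) : pvL a v < a.length := by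
  induction a with
  | nil => cases h
  | cons x r ih =>
    by_cases hr : v ∈ r
    · simp [pvL, hr, ih hr]
    · simp [pvL, hr]

theorem pvL_getD (a : List Int) (v : Int) (h : v ∈ a) : a.getD (pvL a v) 0 = v := by
  induction a with
  | nil => cases h
  | cons x r ih =>
    by_cases hr : v ∈ r
    · simp only [pvL, if_pos hr, List.getD_cons_succ]
      exact ih hr
    · simp only [List.mem_cons] at h
      rcases h with h | h
      · subst h
        simp only [pvL, if_neg hr, List.getD_cons_zero]
      · exact absurd h hr

theorem pvGetD_mem (a : List Int) (j : Nat) (hj : j < a.length) : a.getD j 0 ∈ a := by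
  rw [List.getD_eq_getElem a 0 hj]; exact List.getElem_mem hj

theorem pvL_ge (a : List Int) (v : Int) (j : Nat) (hj : j < a.length) (hv : a.getD j 0 = v) :
    j ≤ pvL a v := by
  induction a generalizing j with
  | nil => simp at hj
  | cons x r ih =>
    cases j with
    | zero => exact Nat.zero_le _
    | succ j =>
      simp only [List.length_cons, Nat.succ_lt_succ_iff] at hj
      simp only [List.getD_cons_succ] at hv
      have hvr : v ∈ r := hv ▸ pvGetD_mem r j hj
      simp only [pvL, if_pos hvr]
      exact Nat.succ_le_succ (ih j hj hv)

theorem pvF_lt (a : List Int) (v : Int) (h : v ∈ a) : pvF a v < a.length := by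
  induction a with
  | nil => cases h
  | cons x r ih =>
    by_cases hx : x = v
    · simp [pvF, hx]
    · have hr : v ∈ r := by
        rcases List.mem_cons.mp h with h' | h'
        · exact absurd h'.symm hx
        · exact h'
      simp [pvF, hx, ih hr]

theorem pvF_getD (a : List Int) (v : Int) (h : v ∈ a) : a.getD (pvF a v) 0 = v := by
  induction a with
  | nil => cases h
  | cons x r ih =>
    by_cases hx : x = v
    · simp [pvF, hx]
    · have hr : v ∈ r := by
        rcases List.mem_cons.mp h with h' | h'
        · exact absurd h'.symm hx
        · exact h'
      simp only [pvF, if_neg hx, List.getD_cons_succ]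
      exact ih hr

theorem pvF_le (a : List Int) (v : Int) (j : Nat) (hj : j < a.length) (hv : a.getD j 0 = v) :
    pvF a v ≤ j := by
  induction a generalizing j with
  | nil => simp at hj
  | cons x r ih =>
    cases j with
    | zero =>
      simp only [List.getD_cons_zero] at hv
      simp [pvF, hv]
    | succ j =>
      simp only [List.length_cons, Nat.succ_lt_succ_iff] at hj
      simp only [List.getD_cons_succ] at hv
      by_cases hx : x = v
      · simp [pvF, hx]
      · simp only [pvF, if_neg hx]
        exact Nat.succ_le_succ (ih j hj hv)

-- A's prefix-sum loop computes pvAcc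
theorem pvFoldAcc (bell : List Int) (t : Int) (acc0 : List Int) :
    ((bell.map (fun x => if x = 1 then (-1 : Int) else 1)).foldl
      (fun (s : Int × List Int) c => (s.1 + c, s.2 ++ [s.1 + c])) (t, acc0))
    = (t + (bell.map pvConv).sum, acc0 ++ pvAcc t bell) := by
  induction bell generalizing t acc0 with
  | nil => simp [pvAcc]
  | cons x r ih =>
    simp only [List.map_cons, List.foldl_cons, List.sum_cons, pvAcc]
    rw [show (if x = 1 then (-1 : Int) else 1) = pvConv x from rfl, ih]
    rw [Prod.mk.injEq]
    refine ⟨by ring, by simp⟩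

-- B's prefix-sum loop computes pvAcc too
theorem pvFoldAccB (bell : List Int) (t : Int) (acc0 : List Int) :
    (bell.foldl
      (fun (s : Int × List Int) x =>
        (s.1 + (if x = 1 then (-1 : Int) else 1), s.2 ++ [s.1 + (if x = 1 then (-1 : Int) else 1)]))
      (t, acc0))
    = (t + (bell.map pvConv).sum, acc0 ++ pvAcc t bell) := by
  induction bell generalizing t acc0 with
  | nil => simp [pvAcc]
  | cons x r ih =>
    simp only [List.foldl_cons, List.map_cons, List.sum_cons, pvAcc]
    rw [show (if x = 1 then (-1 : Int) else 1) = pvConv x from rfl, ih]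
    rw [Prod.mk.injEq]
    refine ⟨by ring, by simp⟩

-- splitting a fold over a pair of independent components
theorem pvFoldPair {α β γ : Type} (l : List γ) (f : α → γ → α) (g : β → γ → β) (p : α × β) :
    l.foldl (fun q x => (f q.1 x, g q.2 x)) p = (l.foldl f p.1, l.foldl g p.2) := by
  induction l generalizing p with
  | nil => rfl
  | cons x r ih => simp [List.foldl_cons, ih]

-- the `start` dict: first-seen index
theorem pvStartGet (a : List Int) (s : Int) (d : PySem.Dict Int Int) (v : Int) :
    ((PySem.List.enumerate a s).foldl
        (fun (d : PySem.Dict Int Int) ix => if d.contains ix.2 then d else d.insert ix.2 ix.1) d).get? v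
    = if d.contains v then d.get? v
      else if v ∈ a then some (s + (pvF a v : Int)) else none := by
  induction a generalizing s d with
  | nil =>
    simp only [PySem.List.enumerate_nil, List.foldl_nil, List.not_mem_nil, if_false]
    by_cases hdv : d.contains v = true
    · simp [hdv]
    · simp only [Bool.not_eq_true] at hdv
      simp [hdv, (PySem.Dict.get?_eq_none_iff_contains d v).mpr hdv]
  | cons x r ih =>
    rw [PySem.List.enumerate_cons, List.foldl_cons, ih]
    by_cases hdv : d.contains v = true
    · by_cases hxv : x = v
      · subst hxv
        by_cases hdx : d.contains x = true
        · simp [hdx, hdv]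
        · simp [hdx] at hdv
      · by_cases hdx : d.contains x = true
        · simp [hdx, hdv]
        · simp [hdx, PySem.Dict.contains_insert, hdv,
            show (v == x) = false by simp [Ne.symm hxv],
            PySem.Dict.get?_insert_of_ne d s (Ne.symm hxv)]
    · simp only [Bool.not_eq_true] at hdv
      by_cases hxv : x = v
      · subst hxv
        simp [hdv, PySem.Dict.contains_insert_self, PySem.Dict.get?_insert_self, pvF]
      · by_cases hdx : d.contains x = true
        · simp only [hdx, if_true, hdv, if_false, pvF, if_neg hxv, List.mem_cons,
            show (v = x) = False by simp [Ne.symm hxv], false_or]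
          by_cases hvr : v ∈ r <;> simp [hvr] <;> try (push_cast; ring_nf)
        · simp only [hdx, if_false, pvF, if_neg hxv, List.mem_cons,
            show (v = x) = False by simp [Ne.symm hxv], false_or]
          by_cases hvr : v ∈ r <;>
            simp [hvr, PySem.Dict.contains_insert, hdv,
              show (v == x) = false by simp [Ne.symm hxv],
              PySem.Dict.get?_insert_of_ne d s (Ne.symm hxv),
              (PySem.Dict.get?_eq_none_iff_contains d v).mpr hdv] <;> try (push_cast; ring_nf)

-- the `end` dict: last-seen index
theorem pvEndGet (a : List Int) (s : Int) (d : PySem.Dict Int Int) (v : Int) :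
    ((PySem.List.enumerate a s).foldl
        (fun (d : PySem.Dict Int Int) ix => d.insert ix.2 ix.1) d).get? v
    = if v ∈ a then some (s + (pvL a v : Int)) else d.get? v := by
  induction a generalizing s d with
  | nil => simp [PySem.List.enumerate_nil]
  | cons x r ih =>
    rw [PySem.List.enumerate_cons, List.foldl_cons, ih]
    by_cases hvr : v ∈ r
    · simp only [hvr, if_true, List.mem_cons, or_true, pvL]
      push_cast; ring_nf
    · by_cases hxv : x = v
      · subst hxv
        simp [hvr, pvL, PySem.Dict.get?_insert_self]
      · simp [hvr, pvL, show v ≠ x from Ne.symm hxv,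
          PySem.Dict.get?_insert_of_ne d s (Ne.symm hxv)]

-- foldl min/max facts over Nat
theorem pvFoldMin_le (t : List Nat) : ∀ lo, ∀ x ∈ lo :: t, t.foldl min lo ≤ x := by
  induction t with
  | nil => intro lo x hx; simp at hx; simp [hx]
  | cons j r ih =>
    intro lo x hx
    simp only [List.foldl_cons]
    rcases List.mem_cons.mp hx with h | h
    · rw [h]
      exact le_trans (ih (min lo j) _ (List.mem_cons_self)) (min_le_left _ _)
    · rcases List.mem_cons.mp h with h | h
      · rw [h]
        exact le_trans (ih (min lo j) _ (List.mem_cons_self)) (min_le_right _ _)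
      · exact ih (min lo j) x (List.mem_cons_of_mem _ h)

theorem pvFoldMin_mem (t : List Nat) : ∀ lo, t.foldl min lo ∈ lo :: t := by
  induction t with
  | nil => intro lo; simp
  | cons j r ih =>
    intro lo
    simp only [List.foldl_cons]
    rcases List.mem_cons.mp (ih (min lo j)) with h | h
    · rw [h]; rcases min_choice lo j with h' | h' <;> simp [h']
    · simp [List.mem_cons_of_mem, h]

theorem pvFoldMax_ge (t : List Nat) : ∀ hi, ∀ x ∈ hi :: t, x ≤ t.foldl max hi := by
  induction t with
  | nil => intro hi x hx; simp at hx; simp [hx]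
  | cons j r ih =>
    intro hi x hx
    simp only [List.foldl_cons]
    rcases List.mem_cons.mp hx with h | h
    · rw [h]
      exact le_trans (le_max_left _ _) (ih (max hi j) _ (List.mem_cons_self))
    · rcases List.mem_cons.mp h with h | h
      · rw [h]
        exact le_trans (le_max_right _ _) (ih (max hi j) _ (List.mem_cons_self))
      · exact ih (max hi j) x (List.mem_cons_of_mem _ h)

theorem pvFoldMax_mem (t : List Nat) : ∀ hi, t.foldl max hi ∈ hi :: t := by
  induction t with
  | nil => intro hi; simp
  | cons j r ih =>
    intro hi
    simp only [List.foldl_cons]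
    rcases List.mem_cons.mp (ih (max hi j)) with h | h
    · rw [h]; rcases max_choice hi j with h' | h' <;> simp [h']
    · simp [List.mem_cons_of_mem, h]

-- pvBGo unrolled: the current run is the takeWhile-prefix of equal values
theorem pvBGo_eq (a : List Int) (v : Int) (lo hi : Nat) (l : List Nat) :
    pvBGo a v lo hi l
    = ((((l.takeWhile (fun j => a.getD j 0 == v)).foldl max hi : Nat) : Int)
        - (((l.takeWhile (fun j => a.getD j 0 == v)).foldl min lo : Nat) : Int))
      :: pvBRuns a (l.dropWhile (fun j => a.getD j 0 == v)) := by
  induction l generalizing v lo hi with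
  | nil => simp [pvBGo, pvBRuns]
  | cons j rest ih =>
    by_cases hj : a.getD j 0 = v
    · simp only [pvBGo, if_pos hj, List.takeWhile_cons, List.dropWhile_cons, hj, beq_self_eq_true,
        if_true, List.foldl_cons]
      exact ih v (min lo j) (max hi j)
    · simp only [pvBGo, if_neg hj, List.takeWhile_cons, List.dropWhile_cons,
        show (a.getD j 0 == v) = false from beq_eq_false_iff_ne.mpr hj, Bool.false_eq_true,
        if_false, List.foldl_nil, pvBRuns]

-- the invariant carried down the sorted order list
def pvInv (a : List Int) (l : List Nat) : Prop :=
  l.Pairwise (fun i j => a.getD i 0 ≤ a.getD j 0) ∧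
  (∀ j ∈ l, j < a.length) ∧
  (∀ j ∈ l, ∀ i, i < a.length → a.getD i 0 = a.getD j 0 → i ∈ l)

-- takeWhile members satisfy the predicate; dropWhile of a sorted list has strictly larger values
theorem pvDrop_gt (a : List Int) (v : Int) (l : List Nat)
    (hp : l.Pairwise (fun i j => a.getD i 0 ≤ a.getD j 0))
    (hge : ∀ j ∈ l, v ≤ a.getD j 0) :
    ∀ k ∈ l.dropWhile (fun j => a.getD j 0 == v), v < a.getD k 0 := by
  induction l with
  | nil => simp
  | cons j rest ih =>
    by_cases hj : a.getD j 0 = v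
    · simp only [List.dropWhile_cons, hj, beq_self_eq_true, if_true]
      exact ih hp.of_cons (fun k hk => hge k (List.mem_cons_of_mem _ hk))
    · simp only [List.dropWhile_cons,
        show (a.getD j 0 == v) = false from beq_eq_false_iff_ne.mpr hj, Bool.false_eq_true,
        if_false]
      intro k hk
      have hvj : v < a.getD j 0 :=
        lt_of_le_of_ne (hge j List.mem_cons_self) (Ne.symm hj)
      rcases List.mem_cons.mp hk with h | h
      · subst h; exact hvj
      · exact lt_of_lt_of_le hvj ((List.pairwise_cons.mp hp).1 k h)

-- the span emitted for the run of value v at the head is exactly pvL - pvF,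
-- provided the run contains every index of value v
theorem pvRuns_spec (a : List Int) (l : List Nat) (hinv : pvInv a l) :
    (∀ s ∈ pvBRuns a l, ∃ v ∈ a, s = (pvL a v : Int) - (pvF a v : Int)) ∧
    (∀ j ∈ l, ∃ s ∈ pvBRuns a l, s = (pvL a (a.getD j 0) : Int) - (pvF a (a.getD j 0) : Int)) := by
  obtain ⟨hp, hlt, hcl⟩ := hinv
  induction hlen : l.length using Nat.strong_induction_on generalizing l with
  | _ n ih =>
  cases l with
  | nil => simp [pvBRuns]
  | cons j rest =>
    set v := a.getD j 0 with hv
    set q : Nat → Bool := fun i => a.getD i 0 == v with hq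
    set t := rest.takeWhile q with ht
    set d := rest.dropWhile q with hd
    have hjlt : j < a.length := hlt j List.mem_cons_self
    have hva : v ∈ a := pvGetD_mem a j hjlt
    have hrest : ∀ x ∈ rest, v ≤ a.getD x 0 := (List.pairwise_cons.mp hp).1
    have htval : ∀ x ∈ j :: t, a.getD x 0 = v := by
      intro x hx
      rcases List.mem_cons.mp hx with h | h
      · subst h; rfl
      · have := List.mem_takeWhile_imp h
        exact eq_of_beq this
    have htmem : ∀ x ∈ j :: t, x ∈ j :: rest := by
      intro x hx
      rcases List.mem_cons.mp hx with h | h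
      · simp [h]
      · exact List.mem_cons_of_mem _ ((rest.takeWhile_sublist q).mem h)
    have hdgt : ∀ k ∈ d, v < a.getD k 0 := pvDrop_gt a v rest hp.of_cons hrest
    -- the run's min is pvF a v
    have hmin : t.foldl min j = pvF a v := by
      have h1 : pvF a v ≤ t.foldl min j := by
        have hm := pvFoldMin_mem t j
        exact pvF_le a v _ (hlt _ (htmem _ hm)) (htval _ hm)
      have h2 : t.foldl min j ≤ pvF a v := by
        have hFlt : pvF a v < a.length := pvF_lt a v hva
        have hFin : pvF a v ∈ j :: rest := hcl j List.mem_cons_self _ hFlt (pvF_getD a v hva)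
        have hFnotd : pvF a v ∉ d := by
          intro hmem
          exact absurd (pvF_getD a v hva) (ne_of_gt (hdgt _ hmem))
        have hFt : pvF a v ∈ j :: t := by
          rcases List.mem_cons.mp hFin with h | h
          · simp [h]
          · rw [← rest.takeWhile_append_dropWhile (p := q)] at h
            rcases List.mem_append.mp h with h | h
            · exact List.mem_cons_of_mem _ h
            · exact absurd h hFnotd
        exact pvFoldMin_le t j _ hFt
      omega
    -- the run's max is pvL a v
    have hmax : t.foldl max j = pvL a v := by
      have h1 : t.foldl max j ≤ pvL a v := by
        have hm := pvFoldMax_mem t j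
        exact pvL_ge a v _ (hlt _ (htmem _ hm)) (htval _ hm)
      have h2 : pvL a v ≤ t.foldl max j := by
        have hLlt : pvL a v < a.length := pvL_lt a v hva
        have hLin : pvL a v ∈ j :: rest := hcl j List.mem_cons_self _ hLlt (pvL_getD a v hva)
        have hLnotd : pvL a v ∉ d := by
          intro hmem
          exact absurd (pvL_getD a v hva) (ne_of_gt (hdgt _ hmem))
        have hLt : pvL a v ∈ j :: t := by
          rcases List.mem_cons.mp hLin with h | h
          · simp [h]
          · rw [← rest.takeWhile_append_dropWhile (p := q)] at h
            rcases List.mem_append.mp h with h | h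
            · exact List.mem_cons_of_mem _ h
            · exact absurd h hLnotd
        exact pvFoldMax_ge t j _ hLt
      omega
    have hruns : pvBRuns a (j :: rest)
        = ((pvL a v : Int) - (pvF a v : Int)) :: pvBRuns a d := by
      rw [pvBRuns, pvBGo_eq, ← hv, ← hq, ← ht, ← hd, hmin, hmax]
    -- the invariant for the tail d
    have hpd : d.Pairwise (fun i k => a.getD i 0 ≤ a.getD k 0) :=
      hp.of_cons.sublist (rest.dropWhile_sublist q)
    have hltd : ∀ k ∈ d, k < a.length := fun k hk =>
      hlt k (List.mem_cons_of_mem _ ((rest.dropWhile_sublist q).mem hk))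
    have hcld : ∀ k ∈ d, ∀ i, i < a.length → a.getD i 0 = a.getD k 0 → i ∈ d := by
      intro k hk i hilt hival
      have hkl : k ∈ j :: rest := List.mem_cons_of_mem _ ((rest.dropWhile_sublist q).mem hk)
      have hil : i ∈ j :: rest := hcl k hkl i hilt hival
      have hine : a.getD i 0 ≠ v := by
        rw [hival]; exact ne_of_gt (hdgt k hk)
      rcases List.mem_cons.mp hil with h | h
      · exact absurd (h ▸ rfl : a.getD i 0 = v) hine
      · rw [← rest.takeWhile_append_dropWhile (p := q)] at h
        rcases List.mem_append.mp h with h | h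
        · exact absurd (htval i (List.mem_cons_of_mem _ h)) hine
        · exact h
    have hdlen : d.length < n := by
      have hle := rest.dropWhile_sublist q |>.length_le
      rw [hd, ← hlen, List.length_cons]
      omega
    have ihd := ih d.length hdlen d hpd hltd hcld rfl
    constructor
    · intro s hs
      rw [hruns] at hs
      rcases List.mem_cons.mp hs with h | h
      · exact ⟨v, hva, h⟩
      · exact ihd.1 s h
    · intro x hx
      by_cases hxv : a.getD x 0 = v
      · refine ⟨(pvL a v : Int) - (pvF a v : Int), ?_, by rw [hxv]⟩
        rw [hruns]; exact List.mem_cons_self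
      · have hxd : x ∈ d := by
          rcases List.mem_cons.mp hx with h | h
          · exact absurd (h ▸ rfl : a.getD x 0 = v) hxv
          · rw [← rest.takeWhile_append_dropWhile (p := q)] at h
            rcases List.mem_append.mp h with h | h
            · exact absurd (htval x (List.mem_cons_of_mem _ h)) hxv
            · exact h
        obtain ⟨s, hsmem, hs⟩ := ihd.2 x hxd
        refine ⟨s, ?_, hs⟩
        rw [hruns]
        exact List.mem_cons_of_mem _ hsmem

-- max over two mutually dominating nonempty-equivalent lists agree
theorem pvMaxEq (xs ys : List Int) (hne : xs = [] ↔ ys = [])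
    (h1 : ∀ x ∈ xs, ∃ y ∈ ys, x ≤ y) (h2 : ∀ y ∈ ys, ∃ x ∈ xs, y ≤ x) :
    (PySem.List.max? xs (fun y => y)).getD 0 = (PySem.List.max? ys (fun y => y)).getD 0 := by
  rcases hx : PySem.List.max? xs (fun y => y) with _ | m1
  · rw [PySem.List.max?_eq_none_iff] at hx
    have : ys = [] := hne.mp hx
    subst this
    simp [PySem.List.max?]
  · rcases hy : PySem.List.max? ys (fun y => y) with _ | m2
    · rw [PySem.List.max?_eq_none_iff] at hy
      have hx0 : xs = [] := hne.mpr hy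
      subst hx0
      simp [PySem.List.max?] at hx
    · have hm1 : m1 ∈ xs := PySem.List.max?_mem hx
      have hm2 : m2 ∈ ys := PySem.List.max?_mem hy
      obtain ⟨y, hyin, hle1⟩ := h1 m1 hm1
      obtain ⟨x, hxin, hle2⟩ := h2 m2 hm2
      have hb1 := PySem.List.max?_isMax hy
      have hb2 := PySem.List.max?_isMax hx
      have : m1 ≤ m2 := le_trans hle1 (hb1 y hyin)
      have : m2 ≤ m1 := le_trans hle2 (hb2 x hxin)
      simp [le_antisymm ‹m1 ≤ m2› ‹m2 ≤ m1›]

-- ===== VERDICT (by name: the statement is the Claim_ definition above) =====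
theorem solution_spec : Claim_equal_solution := by
  intro bell _ hpre
  unfold Spec_solution
  simp only [solution, solution_alt]
  rw [PySem.List.foldl_pyRange_zero_pyGetD (bell.map (fun x => if x = 1 then (-1 : Int) else 1))
      0 (fun (s : Int × List Int) c => (s.1 + c, s.2 ++ [s.1 + c])) ((0 : Int), ([] : List Int))]
  simp only [pvFoldAcc bell 0 [], pvFoldAccB bell 0 [], List.nil_append,
    pvFoldPair (PySem.List.enumerate (pvAcc 0 bell) 0)
      (fun (d : PySem.Dict Int Int) ix => if d.contains ix.2 then d else d.insert ix.2 ix.1)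
      (fun (d : PySem.Dict Int Int) ix => d.insert ix.2 ix.1)
      (PySem.Dict.empty, PySem.Dict.empty)]
  set a := pvAcc 0 bell with ha
  set S := (PySem.List.enumerate a 0).foldl
      (fun (d : PySem.Dict Int Int) ix => if d.contains ix.2 then d else d.insert ix.2 ix.1)
      PySem.Dict.empty with hSdef
  set E := (PySem.List.enumerate a 0).foldl
      (fun (d : PySem.Dict Int Int) ix => d.insert ix.2 ix.1) PySem.Dict.empty with hEdef
  set ord := PySem.List.sorted (List.range a.length) (fun i => a.getD i 0) false with hord
  have hane : a ≠ [] := by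
    cases bell with
    | nil => exact absurd rfl hpre
    | cons x r => rw [ha]; simp [pvAcc]
  have hS : ∀ v, S.get? v = if v ∈ a then some ((0 : Int) + (pvF a v : Int)) else none := by
    intro v
    rw [hSdef, pvStartGet a 0 PySem.Dict.empty v]
    simp [PySem.Dict.contains_empty]
  have hE : ∀ v, E.get? v = if v ∈ a then some ((0 : Int) + (pvL a v : Int)) else none := by
    intro v
    rw [hEdef, pvEndGet a 0 PySem.Dict.empty v]
    simp [PySem.Dict.get?_empty]
  have hkeys : ∀ v, v ∈ E.keys ↔ v ∈ a := by
    intro v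
    rw [← not_iff_not, ← PySem.Dict.get?_eq_none_iff_not_mem_keys, hE]
    by_cases hv : v ∈ a <;> simp [hv]
  have hgetE : ∀ v, v ∈ a → E.getD v 0 = (0 : Int) + (pvL a v : Int) := by
    intro v hv
    rw [PySem.Dict.getD_eq_get?_getD, hE, if_pos hv, Option.getD_some]
  have hgetS : ∀ v, v ∈ a → S.getD v 0 = (0 : Int) + (pvF a v : Int) := by
    intro v hv
    rw [PySem.Dict.getD_eq_get?_getD, hS, if_pos hv, Option.getD_some]
  have hmemord : ∀ j, j ∈ ord ↔ j < a.length := by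
    intro j
    rw [hord, PySem.List.mem_sorted, List.mem_range]
  have hinv : pvInv a ord := by
    refine ⟨PySem.List.sorted_pairwise _ _, fun j hj => (hmemord j).mp hj, ?_⟩
    intro j _ i hi _
    exact (hmemord i).mpr hi
  have hspec := pvRuns_spec a ord hinv
  apply pvMaxEq
  · -- both lists are nonempty (bell ≠ [])
    obtain ⟨w, r, hw⟩ := List.exists_cons_of_ne_nil hane
    have hxs : E.keys ≠ [] :=
      List.ne_nil_of_mem ((hkeys w).mpr (by rw [hw]; exact List.mem_cons_self))
    constructor
    · intro h
      exact absurd (List.map_eq_nil_iff.mp h) hxs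
    · intro h
      have h0 : (0 : Nat) ∈ ord := (hmemord 0).mpr (by rw [hw]; simp)
      cases hcase : ord with
      | nil => rw [hcase] at h0; cases h0
      | cons j rest =>
        rw [hcase, pvBRuns, pvBGo_eq] at h
        cases h
  · intro x hx
    obtain ⟨v, hvk, rfl⟩ := List.mem_map.mp hx
    have hva : v ∈ a := (hkeys v).mp hvk
    have hFin : pvF a v ∈ ord := (hmemord _).mpr (pvF_lt a v hva)
    obtain ⟨s, hsmem, hs⟩ := hspec.2 (pvF a v) hFin
    rw [pvF_getD a v hva] at hs
    refine ⟨s, hsmem, ?_⟩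
    rw [hgetE v hva, hgetS v hva, hs]
    omega
  · intro y hy
    obtain ⟨v, hva, hs⟩ := hspec.1 y hy
    refine ⟨E.getD v 0 - S.getD v 0, ?_, ?_⟩
    · exact List.mem_map.mpr ⟨v, (hkeys v).mpr hva, rfl⟩
    · rw [hgetE v hva, hgetS v hva, hs]
      omega
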